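-- pv_equiv track=rewrite | github.com/des-labs/local-des-cutouts | src/bulkthumbs.py | valid_fits_colors
-- ===== SOURCE A (Python) =====
-- def is_valid_color_band(color):
--     return isinstance(color, str) and len(color) == 1 and color.lower() in 'grizy'
--
-- def valid_fits_colors(colors_string):
--     '''A FITS color set is a string of color bands with at least one color band specified'''
--     # Ignore case of letters
--     colors_string = colors_string.lower()
--     if not colors_string or not isinstance(colors_string, str):
--         return False
--     valid_colors = ''
--     for color in colors_string:
--         # Detect invalid color bands
--         if not is_valid_color_band(color):
--             return False
--         # Detect redundant colors
--         if color in valid_colors: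
--             return False
--         # Append valid color to redundancy checking string
--         valid_colors += color
--     return True
-- ===== SOURCE B (Python) =====
-- def valid_fits_colors(colors_string):
--     '''A FITS color set is a string of color bands with at least one color band specified'''
--     # Ignore case of letters
--     colors_string = colors_string.lower()
--     matched = 0
--     # Iterate over the five bands, not over the input characters
--     for band in 'grizy':
--         n = sum(1 for c in colors_string if c == band)
--         # A band occurring twice means a redundant color
--         if n > 1:
--             return False
--         matched += n
--     # Every character is accounted for by exactly one band, and at least one is present
--     return matched == len(colors_string) and matched > 0
-- ===== Notes on version B (the rewrite author's own statement) =====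
-- stated objective: alternative
-- what changed: Instead of A's per-character loop with an accumulated redundancy string, B iterates over the five valid bands, counts each band's occurrences in the string (rejecting any count > 1), and checks that the counts sum to the string's length and are positive.
import Mathlib
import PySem

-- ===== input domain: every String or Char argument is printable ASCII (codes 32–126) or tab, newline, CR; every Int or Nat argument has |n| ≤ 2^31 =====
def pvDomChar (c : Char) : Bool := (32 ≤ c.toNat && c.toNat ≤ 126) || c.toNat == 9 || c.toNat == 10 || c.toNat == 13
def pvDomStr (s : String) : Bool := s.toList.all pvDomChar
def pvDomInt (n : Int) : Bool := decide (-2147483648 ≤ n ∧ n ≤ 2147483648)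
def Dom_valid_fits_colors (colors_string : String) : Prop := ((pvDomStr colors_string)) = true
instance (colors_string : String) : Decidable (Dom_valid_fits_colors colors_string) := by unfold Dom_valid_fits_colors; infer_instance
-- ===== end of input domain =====

-- B inverts the iteration: instead of A's per-character loop with an accumulated redundancy
-- string, B loops over the five bands, counting each band's occurrences (objective: alternative).

-- ===== PORT A =====
-- is_valid_color_band(color): on a character of the string, isinstance(color, str) and
-- len(color) == 1 are always True, so only `color.lower() in 'grizy'` remains.
def is_valid_color_band (c : Char) : Bool :=
  PySem.Chars.isIn (PySem.Chars.lower [c]) "grizy".toList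

-- the `for color in colors_string` loop with its `valid_colors` accumulator string
def validFitsLoop : List Char → List Char → Bool
  | [], _ => true
  | c :: rest, valid_colors =>
    if !(is_valid_color_band c) then false
    else if PySem.Chars.isIn [c] valid_colors then false
    else validFitsLoop rest (valid_colors ++ [c])

def valid_fits_colors (colors_string : String) : Bool :=
  if (PySem.Chars.lower colors_string.toList).isEmpty then false
  else validFitsLoop (PySem.Chars.lower colors_string.toList) []

-- ===== PORT B =====
-- the `for band in 'grizy'` loop with its `matched` accumulator; `none` = an early `return False`;
-- `sum(1 for c in colors_string if c == band)` is List.count band (a 0/1-sum over the string)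
def bandCountLoop : List Char → List Char → Nat → Option Nat
  | [], _, matched => some matched
  | b :: bs, l, matched =>
    let n := l.count b
    if n > 1 then none else bandCountLoop bs l (matched + n)

def valid_fits_colors_alt (colors_string : String) : Bool :=
  match bandCountLoop "grizy".toList (PySem.Chars.lower colors_string.toList) 0 with
  | none => false
  | some matched =>
    matched == (PySem.Chars.lower colors_string.toList).length && matched > 0

-- ===== PRECONDITION & SPEC =====
def Spec_valid_fits_colors (colors_string : String) (out : Bool) : Prop := out = valid_fits_colors_alt colors_string
instance (colors_string : String) (out : Bool) : Decidable (Spec_valid_fits_colors colors_string out) := by unfold Spec_valid_fits_colors; infer_instance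

-- ===== CLAIM (what is proved, stated in full; the proofs are below) =====
def Claim_equal_valid_fits_colors : Prop := ∀ (colors_string : String), Dom_valid_fits_colors colors_string → Spec_valid_fits_colors colors_string (valid_fits_colors colors_string)

-- ===== LEMMAS AND PROOFS =====

theorem char_le_iff (a b : Char) : a ≤ b ↔ a.toNat ≤ b.toNat := by
  rw [Char.le_def, UInt32.le_iff_toNat_le]; rfl

theorem lowerChar_idem (c : Char) :
    PySem.Chars.lowerChar (PySem.Chars.lowerChar c) = PySem.Chars.lowerChar c := by
  simp only [PySem.Chars.lowerChar, PySem.Chars.isupper]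
  split_ifs with h1 h2 <;> try rfl
  exfalso
  simp only [decide_eq_true_eq, char_le_iff, Bool.and_eq_true] at h1 h2
  have h65 : ('A').toNat = 65 := by decide
  have h90 : ('Z').toNat = 90 := by decide
  rw [h65, h90] at h1 h2
  rw [Char.toNat_ofNat, if_pos (by simp only [Nat.isValidChar]; omega)] at h2
  omega

theorem mem_lower_fixed (c : Char) (l : List Char) (h : c ∈ PySem.Chars.lower l) :
    PySem.Chars.lowerChar c = c := by
  have hmap : PySem.Chars.lower l = l.map PySem.Chars.lowerChar := by
    simp [PySem.Chars.lower]
  rw [hmap, List.mem_map] at h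
  obtain ⟨x, _, rfl⟩ := h
  exact lowerChar_idem x

theorem isIn_singleton (c : Char) (l : List Char) :
    PySem.Chars.isIn [c] l = decide (c ∈ l) := by
  rw [Bool.eq_iff_iff, PySem.Chars.isIn_iff_infix, List.singleton_infix_iff,
    decide_eq_true_iff]

theorem valid_band_of_fixed (c : Char) (h : PySem.Chars.lowerChar c = c) :
    is_valid_color_band c = decide (c ∈ "grizy".toList) := by
  unfold is_valid_color_band
  have h1 : PySem.Chars.lower [c] = [c] := by simp [PySem.Chars.lower, h]
  rw [h1, isIn_singleton]

theorem nodup_shift (c : Char) (rest acc : List Char) (hm : c ∉ acc) :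
    (rest.Nodup ∧ ∀ x ∈ rest, x ∉ acc ++ [c]) ↔
      ((c :: rest).Nodup ∧ ∀ x ∈ c :: rest, x ∉ acc) := by
  simp only [List.nodup_cons, List.mem_append, List.mem_cons, not_or, List.not_mem_nil, not_false_iff, and_true]
  constructor
  · rintro ⟨hnd, hout⟩
    refine ⟨⟨fun hx => (hout c hx).2 rfl, hnd⟩, ?_⟩
    rintro x (rfl | hx)
    · exact hm
    · exact (hout x hx).1
  · rintro ⟨⟨hcr, hnd⟩, hout⟩
    refine ⟨hnd, fun x hx => ⟨hout x (Or.inr hx), fun h => hcr ?_⟩⟩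
    rw [← h]; exact hx

-- characterisation of A's per-character loop
theorem validFitsLoop_eq (l : List Char) (acc : List Char)
    (hl : ∀ c ∈ l, PySem.Chars.lowerChar c = c) :
    validFitsLoop l acc =
      (l.all (fun c => decide (c ∈ "grizy".toList))
        && decide (l.Nodup ∧ ∀ c ∈ l, c ∉ acc)) := by
  induction l generalizing acc with
  | nil => simp [validFitsLoop]
  | cons c rest ih =>
    have hc := hl c (by simp)
    have hrest : ∀ x ∈ rest, PySem.Chars.lowerChar x = x :=
      fun x hx => hl x (by simp [hx])
    rw [validFitsLoop, valid_band_of_fixed c hc, isIn_singleton]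
    by_cases hg : c ∈ "grizy".toList
    · by_cases hm : c ∈ acc
      · rw [if_neg (by rw [decide_eq_true hg]; decide), if_pos (decide_eq_true hm)]
        have h0 : decide ((c :: rest).Nodup ∧ ∀ x ∈ c :: rest, x ∉ acc) = false := by
          simp only [decide_eq_false_iff_not, not_and]
          exact fun _ h => h c (by simp) hm
        rw [h0, Bool.and_false]
      · rw [if_neg (by rw [decide_eq_true hg]; decide),
          if_neg (by rw [decide_eq_false hm]; decide), ih _ hrest]
        rw [List.all_cons]
        have hgc : decide (c ∈ "grizy".toList) = true := decide_eq_true hg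
        rw [hgc, Bool.true_and, decide_eq_decide.mpr (nodup_shift c rest acc hm)]
    · rw [if_pos (by rw [decide_eq_false hg]; decide)]
      rw [List.all_cons]
      have hgc : decide (c ∈ "grizy".toList) = false := decide_eq_false hg
      rw [hgc, Bool.false_and, Bool.false_and]

-- characterisation of B's per-band loop
theorem bandCountLoop_eq (g l : List Char) (m : Nat) :
    bandCountLoop g l m =
      if ∀ b ∈ g, l.count b ≤ 1 then some (m + (g.map l.count).sum) else none := by
  induction g generalizing m with
  | nil => simp [bandCountLoop]
  | cons b bs ih =>
    rw [bandCountLoop]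
    by_cases hb : l.count b > 1
    · rw [if_pos hb, if_neg]
      intro h
      exact absurd (h b (by simp)) (by omega)
    · rw [if_neg hb, ih]
      have hb' : l.count b ≤ 1 := by omega
      by_cases hbs : ∀ x ∈ bs, l.count x ≤ 1
      · rw [if_pos hbs, if_pos (by
          intro x hx
          rcases List.mem_cons.mp hx with rfl | hx
          · exact hb'
          · exact hbs x hx)]
        simp [List.map_cons, List.sum_cons]
        omega
      · rw [if_neg hbs, if_neg (fun h => hbs (fun x hx => h x (List.mem_cons_of_mem _ hx)))]

-- sum over a duplicate-free list of an indicator of equality with c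
theorem sum_indicator (g : List Char) (hg : g.Nodup) (c : Char) :
    (g.map (fun b => if b = c then 1 else 0)).sum = if c ∈ g then 1 else 0 := by
  induction g with
  | nil => simp
  | cons b bs ihg =>
    obtain ⟨hb, hbs⟩ := List.nodup_cons.mp hg
    simp only [List.map_cons, List.sum_cons, ihg hbs]
    by_cases hbc : b = c
    · have hcb : c ∉ bs := fun h => hb (by rwa [hbc])
      rw [if_pos hbc, if_neg hcb, if_pos (by rw [List.mem_cons]; exact Or.inl hbc.symm)]
    · rw [if_neg hbc]
      by_cases hcb : c ∈ bs
      · rw [if_pos hcb, if_pos (List.mem_cons_of_mem _ hcb)]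
      · rw [if_neg hcb, if_neg (by
          rw [List.mem_cons]
          rintro (rfl | h) <;> [exact hbc rfl; exact hcb h])]

-- the sum of per-band counts measures the characters belonging to some band
theorem sum_counts_eq (g l : List Char) (hg : g.Nodup) :
    (g.map l.count).sum = (l.filter (fun c => decide (c ∈ g))).length := by
  induction l with
  | nil => simp
  | cons c rest ih =>
    have hcount : ∀ b, (c :: rest).count b = rest.count b + (if b = c then 1 else 0) := by
      intro b
      rw [List.count_cons]
      by_cases h : b = c
      · simp [h]
      · simp [h, Ne.symm h]
    have h1 : (g.map (c :: rest).count).sum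
        = (g.map rest.count).sum + (g.map (fun b => if b = c then 1 else 0)).sum := by
      simp only [hcount]
      rw [← List.sum_map_add]
    rw [h1, sum_indicator g hg c, ih]
    by_cases hc : c ∈ g
    · rw [if_pos hc, List.filter_cons, if_pos (decide_eq_true hc)]
      simp
    · rw [if_neg hc, List.filter_cons, if_neg (by rw [decide_eq_false hc]; simp)]
      simp

-- A's condition (all chars valid ∧ no duplicates) ↔ B's (counts ≤ 1 ∧ counts sum to length)
theorem conditions_iff (l : List Char) :
    ((∀ c ∈ l, c ∈ "grizy".toList) ∧ l.Nodup) ↔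
      ((∀ b ∈ "grizy".toList, l.count b ≤ 1)
        ∧ ("grizy".toList.map l.count).sum = l.length) := by
  have hg : ("grizy".toList).Nodup := by decide
  rw [sum_counts_eq _ l hg]
  constructor
  · rintro ⟨hall, hnd⟩
    refine ⟨fun b _ => List.nodup_iff_count_le_one.mp hnd b, ?_⟩
    rw [List.filter_eq_self.mpr (fun c hc => decide_eq_true (hall c hc))]
  · rintro ⟨hcnt, hsum⟩
    have hfe : l.filter (fun c => decide (c ∈ "grizy".toList)) = l :=
      List.filter_sublist.eq_of_length hsum
    have hall : ∀ c ∈ l, c ∈ "grizy".toList := by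
      intro c hc
      have hmem : c ∈ l.filter (fun c => decide (c ∈ "grizy".toList)) := by
        rw [hfe]; exact hc
      exact of_decide_eq_true (List.mem_filter.mp hmem).2
    refine ⟨hall, List.nodup_iff_count_le_one.mpr fun b => ?_⟩
    by_cases hb : b ∈ "grizy".toList
    · exact hcnt b hb
    · have hbl : b ∉ l := fun h => hb (hall b h)
      rw [List.count_eq_zero_of_not_mem hbl]
      omega

-- A's loop result is false when A's condition fails
theorem aSide_false (l : List Char)
    (hA : ¬ ((∀ c ∈ l, c ∈ "grizy".toList) ∧ l.Nodup)) :
    (l.all (fun c => decide (c ∈ "grizy".toList))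
      && decide (l.Nodup ∧ ∀ c ∈ l, c ∉ ([] : List Char))) = false := by
  rw [Bool.and_eq_false_iff]
  by_cases hall : ∀ c ∈ l, c ∈ "grizy".toList
  · right
    rw [decide_eq_false_iff_not]
    rintro ⟨hnd, -⟩
    exact hA ⟨hall, hnd⟩
  · left
    obtain ⟨c, hcl, hcg⟩ := by
      simpa using hall
    rw [List.all_eq_false]
    refine ⟨c, hcl, ?_⟩
    simp [hcg.1, hcg.2.1, hcg.2.2.1, hcg.2.2.2.1, hcg.2.2.2.2]

-- the two programs agree on any list of lowercase-fixed characters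
theorem main_eq (l : List Char) (hfix : ∀ c ∈ l, PySem.Chars.lowerChar c = c) :
    (if l.isEmpty then false else validFitsLoop l []) =
      (match bandCountLoop "grizy".toList l 0 with
        | none => false
        | some matched => matched == l.length && decide (matched > 0)) := by
  cases l with
  | nil => decide
  | cons a t =>
    rw [bandCountLoop_eq]
    by_cases hc : ∀ b ∈ "grizy".toList, List.count b (a :: t) ≤ 1
    · rw [if_pos hc]
      show (if (a :: t).isEmpty = true then false else validFitsLoop (a :: t) [])
          = ((0 + ("grizy".toList.map (a :: t).count).sum == (a :: t).length)
              && decide (0 + ("grizy".toList.map (a :: t).count).sum > 0))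
      rw [if_neg (by simp), validFitsLoop_eq (a :: t) [] hfix, Nat.zero_add]
      by_cases hs : ("grizy".toList.map (a :: t).count).sum = (a :: t).length
      · obtain ⟨hall, hnd⟩ := (conditions_iff (a :: t)).mpr ⟨hc, hs⟩
        have h1 : (a :: t).all (fun c => decide (c ∈ "grizy".toList)) = true := by
          rw [List.all_eq_true]; exact fun c hcl => decide_eq_true (hall c hcl)
        have h2 : decide ((a :: t).Nodup ∧ ∀ c ∈ (a :: t), c ∉ ([] : List Char)) = true :=
          decide_eq_true ⟨hnd, by simp⟩
        have hb1 : (("grizy".toList.map (a :: t).count).sum == (a :: t).length) = true :=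
          beq_iff_eq.mpr hs
        have hb2 : decide (("grizy".toList.map (a :: t).count).sum > 0) = true :=
          decide_eq_true (by rw [hs]; simp)
        rw [h1, h2, hb1, hb2]
      · have hA : ¬ ((∀ c ∈ (a :: t), c ∈ "grizy".toList) ∧ (a :: t).Nodup) :=
          fun h => hs ((conditions_iff (a :: t)).mp h).2
        have hb1 : (("grizy".toList.map (a :: t).count).sum == (a :: t).length) = false := by
          rw [beq_eq_false_iff_ne]; exact hs
        rw [aSide_false (a :: t) hA, hb1, Bool.false_and]
    · rw [if_neg hc]
      show (if (a :: t).isEmpty = true then false else validFitsLoop (a :: t) []) = false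
      rw [if_neg (by simp), validFitsLoop_eq (a :: t) [] hfix]
      exact aSide_false (a :: t)
        (fun h => hc ((conditions_iff (a :: t)).mp h).1)

-- ===== VERDICT (by name: the statement is the Claim_ definition above) =====
theorem valid_fits_colors_spec : Claim_equal_valid_fits_colors := by
  intro s _
  unfold Spec_valid_fits_colors valid_fits_colors valid_fits_colors_alt
  exact main_eq (PySem.Chars.lower s.toList)
    (fun c hc => mem_lower_fixed c s.toList hc)
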